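-- pv_equiv track=rewrite | github.com/Aman-256/Volatility_Surface_MonteCarlo | Option Prep/expirydate.py | generate_expiry_date
-- ===== SOURCE A (Python) =====
-- from itertools import product
--
-- def generate_expiry_date(years, months, days):
--     """Generate a set of expiration dates in YYMMDD format from input years, months, and days.
--
--     Parameters:
--         years (set of int): Set of years (e.g., {2024, 2025}).
--         months (set of int): Set of months (e.g., {10, 11}).
--         days (set of int): Set of days (e.g., {28, 29}).
--
--     Returns:
--         set of str: Expiration dates in 'YYMMDD' string format.
--     """
--     expiry_date = set()
--
--     # Use product to create combinations of years, months, and days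
--     for year, month, day in product(years, months, days):
--         # Format each date as YYMMDD
--         year_str = str(year)[-2:]  # Take the last two digits of the year
--         month_str = f"{month:02}"  # Zero-pad month to two digits
--         day_str = f"{day:02}"      # Zero-pad day to two digits
--         expiry_date.add(f"{year_str}{month_str}{day_str}")
--
--     return expiry_date
-- ===== SOURCE B (Python) =====
-- def generate_expiry_date(years, months, days):
--     """Two-stage build: distinct 2-char year codes and distinct MMDD suffixes
--     are precomputed once, then combined in a single comprehension."""
--     year_codes = list(dict.fromkeys(str(y)[-2:] for y in years))
--     suffixes = list(dict.fromkeys(f"{m:02}{d:02}" for m in months for d in days))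
--     return {yc + s for yc in year_codes for s in suffixes}
-- ===== Notes on version B (the rewrite author's own statement) =====
-- stated objective: alternative
-- what changed: Instead of one flat loop over the year-month-day triple product with set insertion, B precomputes the distinct 2-char year codes and the distinct MMDD suffixes once each (ordered dedup via dict.fromkeys) and then combines the two small deduplicated tables in a single comprehension.
import Mathlib
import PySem

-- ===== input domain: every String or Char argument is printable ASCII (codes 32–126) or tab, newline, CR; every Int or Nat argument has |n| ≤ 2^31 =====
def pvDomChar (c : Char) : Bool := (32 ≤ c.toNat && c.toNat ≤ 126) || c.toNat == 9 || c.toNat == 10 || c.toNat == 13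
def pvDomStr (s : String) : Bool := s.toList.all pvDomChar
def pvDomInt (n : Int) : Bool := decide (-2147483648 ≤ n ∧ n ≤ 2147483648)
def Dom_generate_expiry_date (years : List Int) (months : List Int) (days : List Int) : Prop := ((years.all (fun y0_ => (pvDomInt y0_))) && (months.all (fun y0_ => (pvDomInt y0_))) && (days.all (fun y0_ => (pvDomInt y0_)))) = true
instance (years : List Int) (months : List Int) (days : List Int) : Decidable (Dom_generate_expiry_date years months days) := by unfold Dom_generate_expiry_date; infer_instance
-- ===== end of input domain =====

-- B precomputes the distinct year codes and distinct MMDD suffixes once each, then combines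
-- the two deduplicated tables; A folds set-insertion over the flat triple product.
-- Both ports work on List Char internally (Python str ≅ List Char) and pack with String.ofList.

-- ===== PORT A =====
-- str(year)[-2:] : last two code points of str(year)
def pvYearChars (y : Int) : List Char :=
  PySem.List.slice (PySem.Int.toChars y) (some (-2)) none

-- f"{n:02}": zero-pad to width 2; str(n) already has ≥ 2 chars unless 0 ≤ n ≤ 9
-- (negative ints carry '-', n ≥ 10 has two digits), so this is exact for format spec "02".
def pvPad2 (n : Int) : List Char :=
  if 0 ≤ n ∧ n ≤ 9 then '0' :: PySem.Int.toChars n else PySem.Int.toChars n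

def generate_expiry_date (years : List Int) (months : List Int) (days : List Int) : List String :=
  (years.flatMap fun y => months.flatMap fun m => days.map fun d => (y, m, d)).foldl
    (fun acc t =>
      PySem.Set.add acc (String.ofList (pvYearChars t.1 ++ pvPad2 t.2.1 ++ pvPad2 t.2.2)))
    PySem.Set.empty

-- ===== PORT B =====
def generate_expiry_date_alt (years : List Int) (months : List Int) (days : List Int) : List String :=
  let ycodes := PySem.List.dedup (years.map fun y => pvYearChars y)
  let sfxs := PySem.List.dedup (months.flatMap fun m => days.map fun d => pvPad2 m ++ pvPad2 d)
  PySem.Set.ofList (ycodes.flatMap fun yc => sfxs.map fun s => String.ofList (yc ++ s))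

-- ===== PRECONDITION & SPEC =====
def Spec_generate_expiry_date (years : List Int) (months : List Int) (days : List Int) (out : List String) : Prop := out = generate_expiry_date_alt years months days
instance (years : List Int) (months : List Int) (days : List Int) (out : List String) : Decidable (Spec_generate_expiry_date years months days out) := by unfold Spec_generate_expiry_date; infer_instance

-- ===== CLAIM (what is proved, stated in full; the proofs are below) =====
def Claim_equal_generate_expiry_date : Prop := ∀ (years : List Int) (months : List Int) (days : List Int), Dom_generate_expiry_date years months days → Spec_generate_expiry_date years months days (generate_expiry_date years months days)

-- ===== LEMMAS AND PROOFS =====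

-- folding Set.add over a list is Set.update
theorem pv_foldl_add_eq_update {α : Type} [BEq α] (l : List α) (s : PySem.Set α) :
    l.foldl PySem.Set.add s = PySem.Set.update s l := rfl

-- update by elements already present is a no-op
theorem pv_update_of_subset {α : Type} [BEq α] [LawfulBEq α] (l : List α) (s : PySem.Set α)
    (h : ∀ y ∈ l, y ∈ s) : PySem.Set.update s l = s := by
  induction l generalizing s with
  | nil => rfl
  | cons x t ih =>
      rw [PySem.Set.update_cons, PySem.Set.add_of_mem (h x (by simp))]
      exact ih s (fun y hy => h y (by simp [hy]))

-- folding the per-code block F over a list only grows the set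
theorem pv_mem_foldl_F {α σ : Type} (S : List σ) (f : α → σ → String)
    (Y : List α) (acc : PySem.Set String) (y : String) (hy : y ∈ acc) :
    y ∈ Y.foldl (fun acc yc => (S.map (f yc)).foldl PySem.Set.add acc) acc := by
  induction Y generalizing acc with
  | nil => exact hy
  | cons x t ih =>
      exact ih _ ((PySem.Set.mem_update (s := acc) (xs := S.map (f x)) y).2 (Or.inl hy))

-- every combination of a processed code with a suffix is in the fold's result
theorem pv_mem_foldl_F_of_mem {α σ : Type} (S : List σ) (f : α → σ → String)
    (Y : List α) (acc : PySem.Set String) (x : α) (hx : x ∈ Y) (s : σ) (hs : s ∈ S) :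
    f x s ∈ Y.foldl (fun acc yc => (S.map (f yc)).foldl PySem.Set.add acc) acc := by
  induction Y generalizing acc with
  | nil => cases hx
  | cons y0 t ih =>
      rcases List.mem_cons.1 hx with h | h
      · subst h
        exact pv_mem_foldl_F S f t _ _
          ((PySem.Set.mem_update (s := acc) (xs := S.map (f x)) (f x s)).2 (Or.inr (List.mem_map_of_mem hs)))
      · exact ih _ h

-- MAIN: deduplicating the outer list does not change the nested set-building fold
theorem pv_foldl_F_dedup {α σ : Type} [BEq α] [LawfulBEq α] (S : List σ) (f : α → σ → String)
    (Y : List α) (acc : PySem.Set String) :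
    (PySem.List.dedup Y).foldl (fun acc yc => (S.map (f yc)).foldl PySem.Set.add acc) acc
      = Y.foldl (fun acc yc => (S.map (f yc)).foldl PySem.Set.add acc) acc := by
  induction Y using List.reverseRecOn generalizing acc with
  | nil => rfl
  | append_singleton Y x ih =>
      rw [List.foldl_append]
      rw [PySem.List.dedup_eq_ofList, PySem.Set.ofList_append_singleton, ← PySem.List.dedup_eq_ofList]
      by_cases hx : x ∈ Y
      · rw [PySem.Set.add_of_mem (by simpa [PySem.List.mem_dedup] using hx), ih]
        simp only [List.foldl]
        rw [pv_foldl_add_eq_update, pv_update_of_subset]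
        intro y hy
        rcases List.mem_map.1 hy with ⟨s, hs, rfl⟩
        exact pv_mem_foldl_F_of_mem S f Y acc x hx s hs
      · rw [PySem.Set.add_of_not_mem (by simpa [PySem.List.mem_dedup] using hx),
            List.foldl_append, ih]

-- deduplicating a list then mapping and set-folding equals mapping and set-folding the raw list
theorem pv_foldl_add_map_dedup {σ : Type} [BEq σ] [LawfulBEq σ] (l : List σ) (f : σ → String)
    (acc : PySem.Set String) :
    ((PySem.List.dedup l).map f).foldl PySem.Set.add acc = (l.map f).foldl PySem.Set.add acc := by
  have h := pv_foldl_F_dedup (α := σ) (σ := Unit) [()] (fun x _ => f x) l acc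
  simpa [List.foldl_map] using h

-- fold over a flatMap is a nested fold
theorem pv_foldl_flatMap {α β γ : Type} (l : List α) (g : α → List β)
    (F : γ → β → γ) (init : γ) :
    (l.flatMap g).foldl F init = l.foldl (fun acc x => (g x).foldl F acc) init := by
  induction l generalizing init with
  | nil => rfl
  | cons x t ih => rw [List.flatMap_cons, List.foldl_append, List.foldl_cons, ih]

-- ===== VERDICT (by name: the statement is the Claim_ definition above) =====
theorem generate_expiry_date_spec : Claim_equal_generate_expiry_date := by
  intro years months days _
  unfold Spec_generate_expiry_date
  have hA : generate_expiry_date years months days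
      = (years.map fun y => pvYearChars y).foldl
          (fun acc yc =>
            (((months.flatMap fun m => days.map fun d => pvPad2 m ++ pvPad2 d)).map
                fun s => String.ofList (yc ++ s)).foldl PySem.Set.add acc) PySem.Set.empty := by
    unfold generate_expiry_date
    rw [pv_foldl_flatMap, List.foldl_map]
    apply PySem.List.foldl_congr_mem
    intro acc y _
    rw [pv_foldl_flatMap, List.map_flatMap, pv_foldl_flatMap]
    apply PySem.List.foldl_congr_mem
    intro acc2 m _
    rw [List.foldl_map, List.map_map, List.foldl_map]
    apply PySem.List.foldl_congr_mem
    intro acc3 d _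
    simp [List.append_assoc]
  have hB : generate_expiry_date_alt years months days
      = (years.map fun y => pvYearChars y).foldl
          (fun acc yc =>
            (((months.flatMap fun m => days.map fun d => pvPad2 m ++ pvPad2 d)).map
                fun s => String.ofList (yc ++ s)).foldl PySem.Set.add acc) PySem.Set.empty := by
    unfold generate_expiry_date_alt
    rw [PySem.Set.ofList_eq_foldl, pv_foldl_flatMap]
    simp only [pv_foldl_add_map_dedup]
    exact pv_foldl_F_dedup _ (fun yc s => String.ofList (yc ++ s)) _ _
  exact hA.trans hB.symm
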